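-- pv_equiv track=rewrite | github.com/baizhi1997/LeetCode | Problemset/nGK0Fy/nGK0Fy.py | calculate
-- ===== SOURCE A (Python) =====
-- def calculate(s: str) -> int:
--     x, y = 1, 0
--     for c in s:
--         if c == 'A':
--             x = x*2+y
--         else:
--             y = y*2+x
--     return x+y
-- ===== SOURCE B (Python) =====
-- def calculate(s: str) -> int:
--     # x+y doubles on every character (both branches), starting at 1+0=1,
--     # so the result is the closed form 2 ** len(s).
--     return 2 ** len(s)
-- ===== Notes on version B (the rewrite author's own statement) =====
-- stated objective: simpler
-- what changed: Replaced the two-accumulator loop by the closed form 2**len(s), using the invariant that x+y doubles on every character.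
import Mathlib
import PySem

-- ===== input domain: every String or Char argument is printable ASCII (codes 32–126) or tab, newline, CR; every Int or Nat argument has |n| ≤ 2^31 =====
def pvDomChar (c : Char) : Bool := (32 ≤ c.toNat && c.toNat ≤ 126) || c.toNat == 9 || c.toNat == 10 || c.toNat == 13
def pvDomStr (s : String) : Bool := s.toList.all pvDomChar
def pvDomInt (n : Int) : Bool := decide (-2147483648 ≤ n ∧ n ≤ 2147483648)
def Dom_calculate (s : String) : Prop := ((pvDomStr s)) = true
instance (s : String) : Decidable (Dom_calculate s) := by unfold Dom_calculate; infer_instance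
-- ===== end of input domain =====

-- B replaces A's two-accumulator loop by the closed form 2^len(s) (simpler; x+y doubles per char).


-- ===== PORT A =====
def calculate (s : String) : Int :=
  let st := s.toList.foldl
    (fun (p : Int × Int) c =>
      if c = 'A' then (p.1 * 2 + p.2, p.2) else (p.1, p.2 * 2 + p.1))
    (1, 0)
  st.1 + st.2

-- ===== PORT B =====
def calculate_alt (s : String) : Int :=
  2 ^ s.toList.length

-- ===== PRECONDITION & SPEC =====
def Spec_calculate (s : String) (out : Int) : Prop := out = calculate_alt s
instance (s : String) (out : Int) : Decidable (Spec_calculate s out) := by unfold Spec_calculate; infer_instance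

-- ===== CLAIM (what is proved, stated in full; the proofs are below) =====
def Claim_equal_calculate : Prop := ∀ (s : String), Dom_calculate s → Spec_calculate s (calculate s)

-- ===== LEMMAS AND PROOFS =====
theorem calculate_fold_sum (l : List Char) : ∀ (x y : Int),
    (let st := l.foldl
      (fun (p : Int × Int) c =>
        if c = 'A' then (p.1 * 2 + p.2, p.2) else (p.1, p.2 * 2 + p.1))
      (x, y)
     st.1 + st.2) = (x + y) * 2 ^ l.length := by
  induction l with
  | nil => intro x y; simp
  | cons c t ih =>
    intro x y
    simp only [List.foldl_cons, List.length_cons]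
    by_cases h : c = 'A' <;> simp only [h, if_pos, ite_false] <;>
      · rw [ih]; ring

-- ===== VERDICT (by name: the statement is the Claim_ definition above) =====
theorem calculate_spec : Claim_equal_calculate := by
  intro s _
  unfold Spec_calculate calculate calculate_alt
  simpa using calculate_fold_sum s.toList 1 0
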